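-- pv_equiv track=rewrite | github.com/yfding98/pets_angent | classify/app/utils.py | classify_animal_from_index
-- ===== SOURCE A (Python) =====
-- ANIMAL_CATEGORIES = {
--     "家犬 (Domestic Dog)": list(range(151, 269)),
--     "猫科动物 (Cat)": list(range(281, 294)),  # 合并了家猫和野猫
--     "宠物鸟 (Pet Bird)": [88, 89, 90],
--     "小型宠物 (Small Pet)": [333, 337],
--     "鸟类 (Bird)": list(range(7, 147)),
--     "爬行与两栖动物 (Reptile/Amphibian)": list(range(25, 27)) + list(range(30, 38)) + list(range(48, 73)),
--     "鱼类 (Fish)": list(range(0, 3)) + list(range(389, 398)),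
--     "昆虫与蛛形纲 (Insect/Arachnid)": list(range(73, 77)) + list(range(300, 321)),
--     "野生哺乳动物 (Wild Mammal)": list(range(269, 281)) + list(range(294, 389)),  # 包含了野生犬科和其他哺乳动物
-- }
--
-- def classify_animal_from_index(pred_index):
--     if pred_index in ANIMAL_CATEGORIES["家犬 (Domestic Dog)"]:
--         return "家犬 (Domestic Dog)"
--     if pred_index in ANIMAL_CATEGORIES["猫科动物 (Cat)"]:
--         if 281 <= pred_index <= 285:
--             return "家猫 (Domestic Cat)"
--         else:
--             return "野生猫科 (Wild Cat)"
--     if pred_index in ANIMAL_CATEGORIES["宠物鸟 (Pet Bird)"]: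
--         return "宠物鸟 (Pet Bird)"
--     if pred_index in ANIMAL_CATEGORIES["小型宠物 (Small Pet)"]:
--         return "小型宠物 (Small Pet)"
--
--     for category, index_list in ANIMAL_CATEGORIES.items():
--         if pred_index in index_list:
--             return category
--
--     return "非动物 (Not an Animal)"
-- ===== SOURCE B (Python) =====
-- def classify_animal_from_index(pred_index):
--     # One flat cascade of disjoint integer-interval checks, with A's check
--     # priority and the dict-scan overlaps resolved at write time.
--     if 151 <= pred_index < 269:
--         return "家犬 (Domestic Dog)"
--     if 281 <= pred_index <= 285:
--         return "家猫 (Domestic Cat)"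
--     if 286 <= pred_index < 294:
--         return "野生猫科 (Wild Cat)"
--     if 88 <= pred_index <= 90:
--         return "宠物鸟 (Pet Bird)"
--     if pred_index == 333 or pred_index == 337:
--         return "小型宠物 (Small Pet)"
--     if 7 <= pred_index < 147:
--         return "鸟类 (Bird)"
--     if 0 <= pred_index < 3 or 389 <= pred_index < 398:
--         return "鱼类 (Fish)"
--     if 300 <= pred_index < 321:
--         return "昆虫与蛛形纲 (Insect/Arachnid)"
--     if 269 <= pred_index < 281 or 294 <= pred_index < 300 or 321 <= pred_index < 389:
--         return "野生哺乳动物 (Wild Mammal)"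
--     return "非动物 (Not an Animal)"
-- ===== Notes on version B (the rewrite author's own statement) =====
-- stated objective: simpler
-- what changed: Replaced A's list-membership cascade plus the fallback scan over the category dict with a single flat cascade of disjoint integer-interval comparisons with the priorities and overlaps resolved at write time (no lists, no loop).
import Mathlib
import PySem

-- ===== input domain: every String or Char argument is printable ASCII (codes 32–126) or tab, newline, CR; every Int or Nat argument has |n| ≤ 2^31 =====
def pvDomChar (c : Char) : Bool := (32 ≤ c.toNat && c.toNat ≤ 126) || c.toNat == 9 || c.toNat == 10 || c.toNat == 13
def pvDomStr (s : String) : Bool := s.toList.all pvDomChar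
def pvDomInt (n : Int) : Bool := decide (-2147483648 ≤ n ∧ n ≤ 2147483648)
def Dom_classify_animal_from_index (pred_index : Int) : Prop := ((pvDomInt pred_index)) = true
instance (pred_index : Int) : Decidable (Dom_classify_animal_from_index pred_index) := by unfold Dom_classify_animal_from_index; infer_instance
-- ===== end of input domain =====

-- B replaces A's list-membership cascade and dict scan with one cascade of
-- disjoint integer-interval comparisons (objective: simpler; no lists at all).

-- ===== PORT A =====
-- module-level ANIMAL_CATEGORIES dict, in insertion order
def ANIMAL_CATEGORIES : List (String × List Int) := [
  ("家犬 (Domestic Dog)", PySem.List.pyRange 151 269 1),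
  ("猫科动物 (Cat)", PySem.List.pyRange 281 294 1),
  ("宠物鸟 (Pet Bird)", [88, 89, 90]),
  ("小型宠物 (Small Pet)", [333, 337]),
  ("鸟类 (Bird)", PySem.List.pyRange 7 147 1),
  ("爬行与两栖动物 (Reptile/Amphibian)",
    PySem.List.pyRange 25 27 1 ++ PySem.List.pyRange 30 38 1 ++ PySem.List.pyRange 48 73 1),
  ("鱼类 (Fish)", PySem.List.pyRange 0 3 1 ++ PySem.List.pyRange 389 398 1),
  ("昆虫与蛛形纲 (Insect/Arachnid)",
    PySem.List.pyRange 73 77 1 ++ PySem.List.pyRange 300 321 1),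
  ("野生哺乳动物 (Wild Mammal)",
    PySem.List.pyRange 269 281 1 ++ PySem.List.pyRange 294 389 1)]

-- ANIMAL_CATEGORIES["<key>"] (all keys are present, so getD default is never used)
def catLookup (k : String) : List Int :=
  (PySem.Dict.mk ANIMAL_CATEGORIES).getD k []

-- the `for category, index_list in ANIMAL_CATEGORIES.items(): …` loop with the
-- trailing `return "非动物 (Not an Animal)"`
def catScan (pred_index : Int) : List (String × List Int) → String
  | [] => "非动物 (Not an Animal)"
  | (category, index_list) :: rest =>
      if index_list.contains pred_index then category else catScan pred_index rest

def classify_animal_from_index (pred_index : Int) : String :=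
  if (catLookup "家犬 (Domestic Dog)").contains pred_index then "家犬 (Domestic Dog)"
  else if (catLookup "猫科动物 (Cat)").contains pred_index then
    (if 281 ≤ pred_index ∧ pred_index ≤ 285 then "家猫 (Domestic Cat)" else "野生猫科 (Wild Cat)")
  else if (catLookup "宠物鸟 (Pet Bird)").contains pred_index then "宠物鸟 (Pet Bird)"
  else if (catLookup "小型宠物 (Small Pet)").contains pred_index then "小型宠物 (Small Pet)"
  else catScan pred_index ANIMAL_CATEGORIES

-- ===== PORT B =====
def classify_animal_from_index_alt (pred_index : Int) : String :=
  if 151 ≤ pred_index ∧ pred_index < 269 then "家犬 (Domestic Dog)"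
  else if 281 ≤ pred_index ∧ pred_index ≤ 285 then "家猫 (Domestic Cat)"
  else if 286 ≤ pred_index ∧ pred_index < 294 then "野生猫科 (Wild Cat)"
  else if 88 ≤ pred_index ∧ pred_index ≤ 90 then "宠物鸟 (Pet Bird)"
  else if pred_index = 333 ∨ pred_index = 337 then "小型宠物 (Small Pet)"
  else if 7 ≤ pred_index ∧ pred_index < 147 then "鸟类 (Bird)"
  else if (0 ≤ pred_index ∧ pred_index < 3) ∨ (389 ≤ pred_index ∧ pred_index < 398) then "鱼类 (Fish)"
  else if 300 ≤ pred_index ∧ pred_index < 321 then "昆虫与蛛形纲 (Insect/Arachnid)"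
  else if (269 ≤ pred_index ∧ pred_index < 281) ∨ (294 ≤ pred_index ∧ pred_index < 300) ∨ (321 ≤ pred_index ∧ pred_index < 389) then "野生哺乳动物 (Wild Mammal)"
  else "非动物 (Not an Animal)"

-- ===== PRECONDITION & SPEC =====
def Spec_classify_animal_from_index (pred_index : Int) (out : String) : Prop := out = classify_animal_from_index_alt pred_index
instance (pred_index : Int) (out : String) : Decidable (Spec_classify_animal_from_index pred_index out) := by unfold Spec_classify_animal_from_index; infer_instance

-- ===== CLAIM (what is proved, stated in full; the proofs are below) =====
def Claim_equal_classify_animal_from_index : Prop := ∀ (pred_index : Int), Dom_classify_animal_from_index pred_index → Spec_classify_animal_from_index pred_index (classify_animal_from_index pred_index)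

-- ===== LEMMAS AND PROOFS =====

-- membership in each category list, characterised arithmetically (Bool level)
theorem contains_pyRange (a b x : Int) :
    (PySem.List.pyRange a b 1).contains x = decide (a ≤ x ∧ x < b) := by
  rw [Bool.eq_iff_iff]
  simp [PySem.List.mem_pyRange_one]

theorem lk_dog : catLookup "家犬 (Domestic Dog)" = PySem.List.pyRange 151 269 1 := rfl
theorem lk_cat : catLookup "猫科动物 (Cat)" = PySem.List.pyRange 281 294 1 := rfl
theorem lk_pbird : catLookup "宠物鸟 (Pet Bird)" = [88, 89, 90] := rfl
theorem lk_spet : catLookup "小型宠物 (Small Pet)" = [333, 337] := rfl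

theorem contains_dog (x : Int) :
    (catLookup "家犬 (Domestic Dog)").contains x = decide (151 ≤ x ∧ x < 269) := by
  rw [lk_dog, contains_pyRange]

theorem contains_cat (x : Int) :
    (catLookup "猫科动物 (Cat)").contains x = decide (281 ≤ x ∧ x < 294) := by
  rw [lk_cat, contains_pyRange]

theorem contains_pbird (x : Int) :
    (catLookup "宠物鸟 (Pet Bird)").contains x = decide (x = 88 ∨ x = 89 ∨ x = 90) := by
  rw [lk_pbird, Bool.eq_iff_iff]
  simp

theorem contains_spet (x : Int) :
    (catLookup "小型宠物 (Small Pet)").contains x = decide (x = 333 ∨ x = 337) := by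
  rw [lk_spet, Bool.eq_iff_iff]
  simp

-- the fallback scan, characterised as one arithmetic case split
theorem catScan_eq (x : Int) : catScan x ANIMAL_CATEGORIES =
    if 151 ≤ x ∧ x < 269 then "家犬 (Domestic Dog)"
    else if 281 ≤ x ∧ x < 294 then "猫科动物 (Cat)"
    else if x = 88 ∨ x = 89 ∨ x = 90 then "宠物鸟 (Pet Bird)"
    else if x = 333 ∨ x = 337 then "小型宠物 (Small Pet)"
    else if 7 ≤ x ∧ x < 147 then "鸟类 (Bird)"
    else if ((25 ≤ x ∧ x < 27) ∨ (30 ≤ x ∧ x < 38)) ∨ (48 ≤ x ∧ x < 73) then "爬行与两栖动物 (Reptile/Amphibian)"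
    else if (0 ≤ x ∧ x < 3) ∨ (389 ≤ x ∧ x < 398) then "鱼类 (Fish)"
    else if (73 ≤ x ∧ x < 77) ∨ (300 ≤ x ∧ x < 321) then "昆虫与蛛形纲 (Insect/Arachnid)"
    else if (269 ≤ x ∧ x < 281) ∨ (294 ≤ x ∧ x < 389) then "野生哺乳动物 (Wild Mammal)"
    else "非动物 (Not an Animal)" := by
  simp only [ANIMAL_CATEGORIES, catScan, List.contains_append, contains_pyRange,
    Bool.or_eq_true, decide_eq_true_eq, List.contains_cons, List.contains_nil,
    beq_iff_eq, Bool.false_eq_true, or_false]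

-- ===== VERDICT (by name: the statement is the Claim_ definition above) =====
set_option maxHeartbeats 1000000 in
theorem classify_animal_from_index_spec : Claim_equal_classify_animal_from_index := by
  intro x _
  unfold Spec_classify_animal_from_index classify_animal_from_index classify_animal_from_index_alt
  rw [contains_dog, contains_cat, contains_pbird, contains_spet, catScan_eq]
  simp only [decide_eq_true_eq]
  split_ifs <;> first | rfl | omega
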